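-- pv_equiv track=rewrite | github.com/Algo-Inha/Algo-inha | mang5o/220321/pg-64064.py | solution
-- ===== SOURCE A (Python) =====
-- from collections import deque
-- import copy
--
-- def solution(user_id, banned_id):
--     user_len = len(user_id)
--     banned_len = len(banned_id)
--
--     match = [[] for i in range(len(banned_id))]
--     for i in range(banned_len):
--         now_banned_id = banned_id[i]
--         for j in range(user_len):
--             now_id = user_id[j]
--             if len(now_id) == len(now_banned_id):
--                 tmp_match = True
--                 for idx in range(len(now_id)):
--                     if now_banned_id[idx] != "*":
--                         if now_banned_id[idx] != now_id[idx]: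
--                             tmp_match = False
--                             break
--                 if tmp_match:
--                     match[i].append(j)
--
--     match_len = len(match)
--
--     all_case_deque = deque()
--     all_case_deque.append(set())
--     all_cases = []
--     while len(all_case_deque) > 0:
--         tmp_case = all_case_deque.popleft()
--         if len(tmp_case)<match_len:
--             for ii in range(len(match[len(tmp_case)])):
--                 tmp_tmp_case = copy.copy(tmp_case)
--                 if not match[len(tmp_case)][ii] in tmp_tmp_case:
--                     tmp_tmp_case.add(match[len(tmp_case)][ii])
--                     all_case_deque.append(tmp_tmp_case)
--         else:
--             set_case = set(tmp_case)
--             if len(set_case) == banned_len: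
--                 if not set_case in all_cases:
--                     all_cases.append(set(tmp_case))
--
--     return len(all_cases)
-- ===== SOURCE B (Python) =====
-- def solution(user_id, banned_id):
--     match = [[j for j, u in enumerate(user_id)
--               if len(u) == len(b) and all(bc == '*' or bc == uc for bc, uc in zip(b, u))]
--              for b in banned_id]
--
--     results = set()
--
--     def rec(remaining, chosen):
--         if not remaining:
--             results.add(frozenset(chosen))
--             return
--         for idx in remaining[0]:
--             if idx not in chosen:
--                 rec(remaining[1:], chosen | {idx})
--
--     rec(match, frozenset())
--     return len(results)
-- ===== Notes on version B (the rewrite author's own statement) =====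
-- stated objective: simpler
-- what changed: Replaces A's index-driven triple-loop match building with an enumerate/zip comprehension and A's level-by-level deque BFS over partial assignment sets (with size-indexed row lookup and an online list-membership dedup) with direct recursive depth-first backtracking over the remaining match rows collecting completed sets.
import Mathlib
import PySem

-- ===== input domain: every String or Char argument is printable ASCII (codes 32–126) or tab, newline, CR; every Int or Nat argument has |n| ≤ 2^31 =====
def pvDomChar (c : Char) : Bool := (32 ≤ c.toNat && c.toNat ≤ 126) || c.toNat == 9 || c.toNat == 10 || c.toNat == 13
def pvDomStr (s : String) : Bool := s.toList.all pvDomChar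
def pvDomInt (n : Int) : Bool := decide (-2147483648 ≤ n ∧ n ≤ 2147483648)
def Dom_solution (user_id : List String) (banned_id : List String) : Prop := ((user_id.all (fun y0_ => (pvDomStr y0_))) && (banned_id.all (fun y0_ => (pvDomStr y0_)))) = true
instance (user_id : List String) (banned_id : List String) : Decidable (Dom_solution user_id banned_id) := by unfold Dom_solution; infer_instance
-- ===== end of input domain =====

-- B replaces A's level-by-level deque BFS over partial assignment sets (with a list-membership dedup of
-- the completed sets) by direct recursive backtracking over the match rows, collecting completed
-- assignment sets; objective: simpler (a different decomposition of the same search).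

-- ===== PORT A =====

-- port of A's inner character loop 'for idx in range(len(now_id)): …' with its break
def aCheck (nb nid : List Char) : List Int → Bool
  | [] => true
  | idx :: rest =>
    if PySem.List.pyGetD nb idx ' ' ≠ '*' then
      if PySem.List.pyGetD nb idx ' ' ≠ PySem.List.pyGetD nid idx ' ' then false
      else aCheck nb nid rest
    else aCheck nb nid rest

-- termination potential for the BFS queue (proof device only; the computation never uses it)
def aPot (U n d : Nat) : Nat :=
  if d < n then 1 + U * aPot U n (d + 1) else 1
termination_by n - d
decreasing_by omega

theorem aPot_pos (U n d : Nat) : 0 < aPot U n d := by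
  unfold aPot; split <;> omega

theorem aPot_lt (U n d k : Nat) (hd : d < n) (hk : k ≤ U) :
    k * aPot U n (d + 1) < aPot U n d := by
  conv_rhs => rw [aPot]
  rw [if_pos hd]
  have := aPot_pos U n (d + 1)
  nlinarith

-- port of A's 'while len(all_case_deque) > 0' loop (deque = list, popleft = head)
def aBfs (mtch : List (List Int)) (banned_len : Int)
    (q : List (PySem.Set Int)) (acc : List (PySem.Set Int)) : List (PySem.Set Int) :=
  match q with
  | [] => acc
  | tmp_case :: rest =>
    if h : tmp_case.length < mtch.length then
      aBfs mtch banned_len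
        ((mtch.getD tmp_case.length []).foldl
          (fun dq x =>
            if (!PySem.Set.contains tmp_case x) = true then dq ++ [PySem.Set.add tmp_case x]
            else dq) rest)
        acc
    else
      if PySem.Set.len (PySem.Set.ofList tmp_case) = banned_len then
        if acc.any (fun t => PySem.Set.equal t (PySem.Set.ofList tmp_case)) then
          aBfs mtch banned_len rest acc
        else
          aBfs mtch banned_len rest (acc ++ [PySem.Set.ofList tmp_case])
      else aBfs mtch banned_len rest acc
termination_by (q.map (fun s => aPot ((mtch.map List.length).sum + 1) mtch.length s.length)).sum
decreasing_by
  · simp only [dite_eq_ite]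
    rw [PySem.List.foldl_append_if]
    simp only [List.map_append, List.sum_append, List.map_cons, List.sum_cons, List.map_map]
    have hconst :
        (((mtch.getD tmp_case.length []).filter (fun x => !PySem.Set.contains tmp_case x)).map
          ((fun s => aPot ((mtch.map List.length).sum + 1) mtch.length s.length) ∘
            (fun x => PySem.Set.add tmp_case x))) =
        List.replicate ((mtch.getD tmp_case.length []).filter
          (fun x => !PySem.Set.contains tmp_case x)).length
          (aPot ((mtch.map List.length).sum + 1) mtch.length (tmp_case.length + 1)) := by
      rw [← List.map_const]
      apply List.map_congr_left
      intro x hx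
      have hxnot : x ∉ tmp_case := by
        have hxmem := List.of_mem_filter hx
        intro hmem
        rw [(PySem.Set.contains_iff tmp_case x).mpr hmem] at hxmem
        simp at hxmem
      simp [Function.comp, Function.const, PySem.Set.add_of_not_mem hxnot]
    rw [hconst, List.sum_replicate, smul_eq_mul]
    have hrow : (mtch.getD tmp_case.length []).length ≤ (mtch.map List.length).sum := by
      have : mtch.getD tmp_case.length [] = mtch[tmp_case.length] := List.getD_eq_getElem _ _ h
      rw [this]
      exact List.single_le_sum (by intro x _; omega) _
        (List.mem_map_of_mem (List.getElem_mem h))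
    have hk : ((mtch.getD tmp_case.length []).filter
        (fun x => !PySem.Set.contains tmp_case x)).length ≤ (mtch.map List.length).sum + 1 := by
      have := List.length_filter_le (fun x => !PySem.Set.contains tmp_case x)
        (mtch.getD tmp_case.length [])
      omega
    have := aPot_lt ((mtch.map List.length).sum + 1) mtch.length tmp_case.length
      (((mtch.getD tmp_case.length []).filter (fun x => !PySem.Set.contains tmp_case x)).length)
      h hk
    omega
  all_goals
    simp only [List.map_cons, List.sum_cons]
    have := aPot_pos ((mtch.map List.length).sum + 1) mtch.length tmp_case.length
    omega

def solution (user_id : List String) (banned_id : List String) : Int :=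
  let user_len : Int := (user_id.length : Int)
  let banned_len : Int := (banned_id.length : Int)
  let mtch0 : List (List Int) := (List.range banned_id.length).map (fun _ => ([] : List Int))
  let mtch := (PySem.List.pyRange 0 banned_len 1).foldl (fun m i =>
    let now_banned_id := PySem.List.pyGetD banned_id i ""
    (PySem.List.pyRange 0 user_len 1).foldl (fun m j =>
      let now_id := PySem.List.pyGetD user_id j ""
      if PySem.Str.len now_id = PySem.Str.len now_banned_id then
        if aCheck now_banned_id.toList now_id.toList
            (PySem.List.pyRange 0 (PySem.Str.len now_id) 1) then
          -- match[i].append(j): replace row i by row ++ [j] (i is produced by range(banned_len), so in range)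
          m.set i.toNat (m.getD i.toNat [] ++ [j])
        else m
      else m) m) mtch0
  ((aBfs mtch banned_len [PySem.Set.empty] []).length : Int)

-- ===== PORT B =====

-- [j for j, u in enumerate(user_id) if len(u) == len(b) and all(bc == '*' or bc == uc for bc, uc in zip(b, u))]
def altMatch (user_id : List String) (b : String) : List Int :=
  (PySem.List.enumerate user_id 0).filterMap (fun ju =>
    if (PySem.Str.len ju.2 == PySem.Str.len b &&
        (b.toList.zip ju.2.toList).all (fun p => p.1 == '*' || p.1 == p.2)) = true
    then some ju.1 else none)

-- rec(remaining, chosen): results threaded as an accumulator; results is a Python set of frozensets,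
-- i.e. a list kept free of set-equal duplicates
def altRec (remaining : List (List Int)) (chosen : PySem.Set Int)
    (results : List (PySem.Set Int)) : List (PySem.Set Int) :=
  match remaining with
  | [] =>
    if results.any (fun t => PySem.Set.equal t chosen) then results else results ++ [chosen]
  | m :: tail =>
    m.foldl (fun res idx =>
      if PySem.Set.contains chosen idx then res
      else altRec tail (PySem.Set.add chosen idx) res) results
termination_by remaining.length
decreasing_by simp

def solution_alt (user_id : List String) (banned_id : List String) : Int :=
  let mtch := banned_id.map (fun b => altMatch user_id b)
  ((altRec mtch PySem.Set.empty []).length : Int)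

-- ===== PRECONDITION & SPEC =====
def Spec_solution (user_id : List String) (banned_id : List String) (out : Int) : Prop := out = solution_alt user_id banned_id
instance (user_id : List String) (banned_id : List String) (out : Int) : Decidable (Spec_solution user_id banned_id out) := by unfold Spec_solution; infer_instance

-- ===== CLAIM (what is proved, stated in full; the proofs are below) =====
def Claim_equal_solution : Prop := ∀ (user_id : List String) (banned_id : List String), Dom_solution user_id banned_id → Spec_solution user_id banned_id (solution user_id banned_id)

-- ===== LEMMAS AND PROOFS =====

-- canonical form of a duplicate-free index set: its sorted element list
def canonIdx (s : List Int) : List Int := PySem.List.sorted s (fun x => x)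

theorem canonIdx_eq_iff {s t : List Int} (hs : s.Nodup) (ht : t.Nodup) :
    canonIdx s = canonIdx t ↔ ∀ x, x ∈ s ↔ x ∈ t := by
  rw [canonIdx, canonIdx, PySem.List.sorted_id_eq_sorted_id_iff_perm,
    List.perm_ext_iff_of_nodup hs ht]

-- the complete assignment sets reachable from partial set `chosen` through match rows `rem`
def leavesT : List (List Int) → PySem.Set Int → List (PySem.Set Int)
  | [], s => [s]
  | m :: t, s => m.flatMap (fun x => if x ∈ s then [] else leavesT t (PySem.Set.add s x))
termination_by rem _ => rem.length
decreasing_by simp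

-- Python's 'frozenset(s) in results' is: some member is set-equal, i.e. canonIdx s occurs
theorem any_equal_iff (acc : List (PySem.Set Int)) (s : PySem.Set Int)
    (hs : s.Nodup) (haccN : ∀ t ∈ acc, t.Nodup) :
    (acc.any (fun t => PySem.Set.equal t s) = true) ↔ canonIdx s ∈ acc.map canonIdx := by
  simp only [List.any_eq_true, List.mem_map]
  constructor
  · rintro ⟨t, ht, heq⟩
    exact ⟨t, ht, ((canonIdx_eq_iff (haccN t ht) hs).mpr ((PySem.Set.equal_iff t s).mp heq))⟩
  · rintro ⟨t, ht, hc⟩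
    exact ⟨t, ht, (PySem.Set.equal_iff t s).mpr ((canonIdx_eq_iff (haccN t ht) hs).mp hc)⟩

theorem addIf_spec (acc : List (PySem.Set Int)) (s : PySem.Set Int)
    (hs : s.Nodup) (haccN : ∀ t ∈ acc, t.Nodup) (haccC : (acc.map canonIdx).Nodup) :
    (∀ t ∈ (if acc.any (fun t => PySem.Set.equal t s) then acc else acc ++ [s]), t.Nodup) ∧
    (((if acc.any (fun t => PySem.Set.equal t s) then acc else acc ++ [s]).map canonIdx).Nodup) ∧
    ((if acc.any (fun t => PySem.Set.equal t s) then acc else acc ++ [s]).map canonIdx).toFinset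
      = insert (canonIdx s) (acc.map canonIdx).toFinset := by
  by_cases hA : acc.any (fun t => PySem.Set.equal t s) = true
  · rw [if_pos hA]
    refine ⟨haccN, haccC, ?_⟩
    rw [Finset.insert_eq_self.mpr (List.mem_toFinset.mpr ((any_equal_iff acc s hs haccN).mp hA))]
  · rw [if_neg hA]
    have hnot : canonIdx s ∉ acc.map canonIdx := fun hmem =>
      hA ((any_equal_iff acc s hs haccN).mpr hmem)
    refine ⟨?_, ?_, ?_⟩
    · intro t ht
      rcases List.mem_append.mp ht with h1 | h1
      · exact haccN t h1
      · simpa using (List.mem_singleton.mp h1) ▸ hs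
    · rw [List.map_append]
      simp only [List.nodup_append, List.map_cons, List.map_nil]
      exact ⟨haccC, List.nodup_singleton _, by simpa using hnot⟩
    · rw [List.map_append, List.toFinset_append]
      rw [Finset.insert_eq, Finset.union_comm]
      simp

theorem altRec_spec (rem : List (List Int)) : ∀ (chosen : PySem.Set Int)
    (results : List (PySem.Set Int)), chosen.Nodup →
    (∀ t ∈ results, t.Nodup) → (results.map canonIdx).Nodup →
    (∀ t ∈ altRec rem chosen results, t.Nodup) ∧
    ((altRec rem chosen results).map canonIdx).Nodup ∧
    ((altRec rem chosen results).map canonIdx).toFinset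
      = (results.map canonIdx).toFinset ∪ ((leavesT rem chosen).map canonIdx).toFinset := by
  induction rem with
  | nil =>
    intro chosen results hch hres hresC
    simp only [altRec, leavesT]
    obtain ⟨A, B, C⟩ := addIf_spec results chosen hch hres hresC
    refine ⟨A, B, ?_⟩
    rw [C, Finset.insert_eq, Finset.union_comm]
    simp
  | cons m tail ih =>
    intro chosen results hch hres hresC
    have inner : ∀ (ml : List Int) (res : List (PySem.Set Int)),
        (∀ t ∈ res, t.Nodup) → (res.map canonIdx).Nodup →
        (∀ t ∈ ml.foldl (fun res idx =>
            if PySem.Set.contains chosen idx then res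
            else altRec tail (PySem.Set.add chosen idx) res) res, t.Nodup) ∧
        ((ml.foldl (fun res idx =>
            if PySem.Set.contains chosen idx then res
            else altRec tail (PySem.Set.add chosen idx) res) res).map canonIdx).Nodup ∧
        ((ml.foldl (fun res idx =>
            if PySem.Set.contains chosen idx then res
            else altRec tail (PySem.Set.add chosen idx) res) res).map canonIdx).toFinset
          = (res.map canonIdx).toFinset ∪
            ((ml.flatMap (fun x => if x ∈ chosen then []
              else leavesT tail (PySem.Set.add chosen x))).map canonIdx).toFinset := by
      intro ml
      induction ml with
      | nil => intro res h1 h2; simpa using ⟨h1, h2⟩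
      | cons x m' ihm =>
        intro res h1 h2
        simp only [List.foldl_cons, List.flatMap_cons]
        by_cases hx : x ∈ chosen
        · have hc : PySem.Set.contains chosen x = true := (PySem.Set.contains_iff chosen x).mpr hx
          rw [hc, if_pos rfl]
          obtain ⟨A, B, C⟩ := ihm res h1 h2
          refine ⟨A, B, ?_⟩
          rw [C, if_pos hx]
          simp
        · have hc : PySem.Set.contains chosen x = false := by
            rw [← Bool.not_eq_true]
            exact fun hh => hx ((PySem.Set.contains_iff _ _).mp hh)
          rw [hc]
          simp only [Bool.false_eq_true, if_false]
          obtain ⟨A1, B1, C1⟩ := ih (PySem.Set.add chosen x) res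
            (PySem.Set.nodup_add chosen x hch) h1 h2
          obtain ⟨A2, B2, C2⟩ := ihm _ A1 B1
          refine ⟨A2, B2, ?_⟩
          rw [C2, C1, if_neg hx, List.map_append, List.toFinset_append, Finset.union_assoc]
    simp only [altRec, leavesT]
    exact inner m results hres hresC

theorem flatMap_filter {α β : Type} (l : List α) (p : α → Bool) (h : α → List β) :
    (l.filter p).flatMap h = l.flatMap (fun x => if p x then h x else []) := by
  induction l with
  | nil => simp
  | cons x t ih => by_cases hp : p x <;> simp [hp, ih]

theorem aBfs_spec (mtch : List (List Int)) (q acc : List (PySem.Set Int)) :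
    (∀ s ∈ q, s.Nodup ∧ s.length ≤ mtch.length) →
    (∀ t ∈ acc, t.Nodup) → (acc.map canonIdx).Nodup →
    (∀ t ∈ aBfs mtch (mtch.length : Int) q acc, t.Nodup) ∧
    ((aBfs mtch (mtch.length : Int) q acc).map canonIdx).Nodup ∧
    ((aBfs mtch (mtch.length : Int) q acc).map canonIdx).toFinset
      = (acc.map canonIdx).toFinset ∪
        ((q.flatMap (fun s => leavesT (mtch.drop s.length) s)).map canonIdx).toFinset := by
  induction q, acc using aBfs.induct mtch ((mtch.length : Int)) with
  | case1 acc =>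
    intro _ hacc haccC
    simp only [aBfs, List.flatMap_nil, List.map_nil, List.toFinset_nil, Finset.union_empty]
    exact ⟨hacc, haccC, trivial⟩
  | case2 acc tmp_case rest h IH =>
    intro hq hacc haccC
    have hs : tmp_case.Nodup := (hq tmp_case List.mem_cons_self).1
    have hfold : (List.foldl (fun dq x =>
          if _h : (!tmp_case.contains x) = true then dq ++ [tmp_case.add x] else dq) rest
          (mtch.getD tmp_case.length []))
        = rest ++ ((mtch.getD tmp_case.length []).filter
            (fun x => !PySem.Set.contains tmp_case x)).map (PySem.Set.add tmp_case) := by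
      simp only [dite_eq_ite]
      rw [PySem.List.foldl_append_if]
    rw [hfold] at IH
    have hchild : ∀ c ∈ ((mtch.getD tmp_case.length []).filter
        (fun x => !PySem.Set.contains tmp_case x)).map (PySem.Set.add tmp_case),
        c.Nodup ∧ c.length = tmp_case.length + 1 := by
      intro c hc
      obtain ⟨x, hx, rfl⟩ := List.mem_map.mp hc
      have hxnot : x ∉ tmp_case := by
        have hxf := List.of_mem_filter hx
        intro hmem
        rw [(PySem.Set.contains_iff tmp_case x).mpr hmem] at hxf
        simp at hxf
      exact ⟨PySem.Set.nodup_add _ _ hs, by rw [PySem.Set.add_of_not_mem hxnot]; simp⟩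
    obtain ⟨A, B, C⟩ := IH (by
        intro s hsmem
        rcases List.mem_append.mp hsmem with h1 | h1
        · exact hq s (List.mem_cons_of_mem _ h1)
        · obtain ⟨hn, hl⟩ := hchild s h1
          exact ⟨hn, by omega⟩) hacc haccC
    have hcall : aBfs mtch (mtch.length : Int) (tmp_case :: rest) acc
        = aBfs mtch (mtch.length : Int)
            (rest ++ ((mtch.getD tmp_case.length []).filter
              (fun x => !PySem.Set.contains tmp_case x)).map (PySem.Set.add tmp_case)) acc := by
      conv_lhs => rw [aBfs]
      rw [dif_pos h, PySem.List.foldl_append_if]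
    rw [hcall]
    refine ⟨A, B, ?_⟩
    rw [C]
    have hdrop : mtch.drop tmp_case.length
        = mtch.getD tmp_case.length [] :: mtch.drop (tmp_case.length + 1) := by
      rw [List.getD_eq_getElem _ _ h]
      exact List.drop_eq_getElem_cons h
    have hleaves : (((mtch.getD tmp_case.length []).filter
          (fun x => !PySem.Set.contains tmp_case x)).map (PySem.Set.add tmp_case)).flatMap
            (fun s => leavesT (mtch.drop s.length) s)
        = leavesT (mtch.drop tmp_case.length) tmp_case := by
      rw [List.flatMap_map, flatMap_filter]
      rw [hdrop]
      simp only [leavesT]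
      apply List.flatMap_congr
      intro x hx
      by_cases hxs : x ∈ tmp_case
      · rw [if_neg, if_pos hxs]
        rw [(PySem.Set.contains_iff tmp_case x).mpr hxs]
        simp
      · have hc : (!PySem.Set.contains tmp_case x) = true := by
          simp only [Bool.not_eq_true']
          rw [← Bool.not_eq_true]
          exact fun hh => hxs ((PySem.Set.contains_iff _ _).mp hh)
        rw [if_pos hc, if_neg hxs]
        have hn : (PySem.Set.add tmp_case x).length = tmp_case.length + 1 := by
          rw [PySem.Set.add_of_not_mem hxs]; simp
        rw [hn]
    rw [List.flatMap_append, hleaves, List.flatMap_cons, List.map_append, List.toFinset_append,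
      List.map_append, List.toFinset_append]
    congr 1
    exact Finset.union_comm _ _
  | case3 acc tmp_case rest hlt hlen hany IH =>
    intro hq hacc haccC
    have hs : tmp_case.Nodup := (hq tmp_case List.mem_cons_self).1
    have hl : tmp_case.length = mtch.length :=
      le_antisymm (hq tmp_case List.mem_cons_self).2 (not_lt.mp hlt)
    obtain ⟨A, B, C⟩ := IH (fun s hm => hq s (List.mem_cons_of_mem _ hm)) hacc haccC
    have hcall : aBfs mtch (mtch.length : Int) (tmp_case :: rest) acc
        = aBfs mtch (mtch.length : Int) rest acc := by
      conv_lhs => rw [aBfs]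
      rw [dif_neg hlt, if_pos hlen, if_pos hany]
    rw [hcall]
    refine ⟨A, B, ?_⟩
    rw [C, List.flatMap_cons, hl, List.drop_length]
    simp only [leavesT, List.singleton_append, List.map_cons, List.toFinset_cons]
    have hmem : canonIdx tmp_case ∈ acc.map canonIdx := by
      rw [PySem.Set.ofList_eq_self_of_nodup _ hs] at hany
      exact (any_equal_iff acc tmp_case hs hacc).mp hany
    rw [Finset.insert_eq, ← Finset.union_assoc,
      Finset.union_eq_left.mpr (Finset.singleton_subset_iff.mpr (List.mem_toFinset.mpr hmem))]
  | case4 acc tmp_case rest hlt hlen hany IH =>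
    intro hq hacc haccC
    have hs : tmp_case.Nodup := (hq tmp_case List.mem_cons_self).1
    have hl : tmp_case.length = mtch.length :=
      le_antisymm (hq tmp_case List.mem_cons_self).2 (not_lt.mp hlt)
    rw [PySem.Set.ofList_eq_self_of_nodup _ hs] at hany IH
    have hnot : canonIdx tmp_case ∉ acc.map canonIdx := fun hmem =>
      hany ((any_equal_iff acc tmp_case hs hacc).mpr hmem)
    obtain ⟨A, B, C⟩ := IH (fun s hm => hq s (List.mem_cons_of_mem _ hm))
      (by
        intro t ht
        rcases List.mem_append.mp ht with h1 | h1
        · exact hacc t h1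
        · exact (List.mem_singleton.mp h1) ▸ hs)
      (by
        rw [List.map_append]
        simp only [List.nodup_append, List.map_cons, List.map_nil]
        exact ⟨haccC, List.nodup_singleton _, by simpa using hnot⟩)
    have hcall : aBfs mtch (mtch.length : Int) (tmp_case :: rest) acc
        = aBfs mtch (mtch.length : Int) rest (acc ++ [tmp_case]) := by
      conv_lhs => rw [aBfs]
      rw [dif_neg hlt, if_pos hlen, PySem.Set.ofList_eq_self_of_nodup _ hs, if_neg hany]
    rw [hcall]
    refine ⟨A, B, ?_⟩
    rw [C, List.flatMap_cons, hl, List.drop_length]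
    simp only [leavesT]
    ext a
    simp only [List.map_append, List.toFinset_append, Finset.mem_union, List.map_cons,
      List.map_nil, List.toFinset_cons, List.toFinset_nil, Finset.mem_insert,
      List.singleton_append]
    tauto
  | case5 acc tmp_case rest hlt hlen IH =>
    intro hq hacc haccC
    have hs : tmp_case.Nodup := (hq tmp_case List.mem_cons_self).1
    have hl : tmp_case.length = mtch.length :=
      le_antisymm (hq tmp_case List.mem_cons_self).2 (not_lt.mp hlt)
    exact absurd (by
      rw [PySem.Set.ofList_eq_self_of_nodup _ hs]
      simp [PySem.Set.len, hl]) hlen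

theorem aCheck_aux (nb nid : List Char) (h : nb.length = nid.length) :
    ∀ (d k : Nat), k ≤ nid.length → nid.length - k = d →
    aCheck nb nid (PySem.List.pyRange (k : Int) (nid.length : Int) 1)
      = ((nb.drop k).zip (nid.drop k)).all (fun p => p.1 == '*' || p.1 == p.2) := by
  intro d
  induction d with
  | zero =>
    intro k hk hd
    have hk' : k = nid.length := by omega
    subst hk'
    rw [PySem.List.pyRange_one_eq_nil (by omega)]
    simp [aCheck, List.zip_nil_right, List.drop_length]
  | succ d ihd =>
    intro k hk hd
    have hklt : k < nid.length := by omega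
    have hkb : k < nb.length := by omega
    rw [PySem.List.pyRange_one_cons (by exact_mod_cast hklt)]
    simp only [aCheck]
    rw [PySem.List.pyGetD_natCast, PySem.List.pyGetD_natCast,
      List.getD_eq_getElem _ _ hkb, List.getD_eq_getElem _ _ hklt]
    rw [List.drop_eq_getElem_cons hkb, List.drop_eq_getElem_cons hklt,
      List.zip_cons_cons, List.all_cons]
    have hrec : aCheck nb nid (PySem.List.pyRange ((k : Int) + 1) (nid.length : Int) 1)
        = ((nb.drop (k + 1)).zip (nid.drop (k + 1))).all
            (fun p => p.1 == '*' || p.1 == p.2) := by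
      have hh := ihd (k + 1) (by omega) (by omega)
      push_cast at hh
      exact hh
    rw [hrec]
    by_cases hstar : nb[k] = '*'
    · simp [hstar]
    · by_cases heq2 : nb[k] = nid[k]
      · simp [hstar, heq2]
      · simp [hstar, heq2]

-- A's per-string test equals B's zip/all test (strings of equal length)
theorem aCheck_eq_zip_all (nb nid : List Char) (h : nb.length = nid.length) :
    aCheck nb nid (PySem.List.pyRange 0 (nid.length : Int) 1)
      = (nb.zip nid).all (fun p => p.1 == '*' || p.1 == p.2) := by
  have hh := aCheck_aux nb nid h nid.length 0 (by omega) (by omega)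
  simpa using hh

theorem set_append_cons {α : Type} (p : List α) (x : α) (t : List α) (v : α) :
    (p ++ x :: t).set p.length v = p ++ v :: t := by
  induction p with
  | nil => rfl
  | cons a p ih => simp [List.set_cons_succ, ih]

theorem getD_append_cons {α : Type} (p : List α) (x : α) (t : List α) (d : α) :
    (p ++ x :: t).getD p.length d = x := by
  induction p with
  | nil => rfl
  | cons a p ih => simpa using ih

-- A's inner user loop, acting on row k of the table, appends exactly altMatch user_id b
theorem innerLoop (b : String) (user_id : List String) :
    ∀ (m : List (List Int)) (k : Nat), k < m.length →
    ((PySem.List.pyRange 0 ((user_id.length : Int)) 1).foldl (fun m j =>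
      let now_id := PySem.List.pyGetD user_id j ""
      if PySem.Str.len now_id = PySem.Str.len b then
        if aCheck b.toList now_id.toList
            (PySem.List.pyRange 0 (PySem.Str.len now_id) 1) then
          m.set k (m.getD k [] ++ [j])
        else m
      else m) m)
    = m.set k (m.getD k [] ++ altMatch user_id b) := by
  induction user_id using List.reverseRecOn with
  | nil =>
    intro m k hk
    rw [PySem.List.pyRange_one_eq_nil (by simp)]
    simp only [List.foldl_nil, altMatch, PySem.List.enumerate_nil, List.filterMap_nil,
      List.append_nil]
    rw [List.getD_eq_getElem _ _ hk, List.set_getElem_self]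
  | append_singleton us u ih =>
    intro m k hk
    have hlen : ((us ++ [u]).length : Int) = (us.length : Int) + 1 := by simp
    rw [hlen, PySem.List.pyRange_one_succ_right (by positivity), List.foldl_append]
    have hcongr : (PySem.List.pyRange 0 ((us.length : Int)) 1).foldl (fun m j =>
        let now_id := PySem.List.pyGetD (us ++ [u]) j ""
        if PySem.Str.len now_id = PySem.Str.len b then
          if aCheck b.toList now_id.toList
              (PySem.List.pyRange 0 (PySem.Str.len now_id) 1) then
            m.set k (m.getD k [] ++ [j])
          else m
        else m) m
      = (PySem.List.pyRange 0 ((us.length : Int)) 1).foldl (fun m j =>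
        let now_id := PySem.List.pyGetD us j ""
        if PySem.Str.len now_id = PySem.Str.len b then
          if aCheck b.toList now_id.toList
              (PySem.List.pyRange 0 (PySem.Str.len now_id) 1) then
            m.set k (m.getD k [] ++ [j])
          else m
        else m) m := by
      apply PySem.List.foldl_congr_mem
      intro acc j hj
      obtain ⟨hj0, hj1⟩ := PySem.List.mem_pyRange_one.mp hj
      have hget : PySem.List.pyGetD (us ++ [u]) j "" = PySem.List.pyGetD us j "" := by
        rw [PySem.List.pyGetD_eq_getElem _ _ hj0 (by simp; omega),
          PySem.List.pyGetD_eq_getElem _ _ hj0 (by omega)]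
        exact List.getElem_append_left (by omega)
      simp only [hget]
    rw [hcongr, ih m k hk]
    have hgetu : PySem.List.pyGetD (us ++ [u]) ((us.length : Int)) "" = u := by
      rw [PySem.List.pyGetD_eq_getElem _ _ (by positivity) (by simp)]
      simp
    simp only [List.foldl_cons, List.foldl_nil, hgetu]
    by_cases hL : PySem.Str.len u = PySem.Str.len b
    · have hL' : u.toList.length = b.toList.length := by
        have h1 : PySem.Str.len u = (u.toList.length : Int) := by simp [pysem]
        have h2 : PySem.Str.len b = (b.toList.length : Int) := by simp [pysem]
        rw [h1, h2] at hL
        exact_mod_cast hL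
      have hA : aCheck b.toList u.toList (PySem.List.pyRange 0 (PySem.Str.len u) 1)
          = (b.toList.zip u.toList).all (fun p => p.1 == '*' || p.1 == p.2) := by
        rw [show PySem.Str.len u = ((u.toList.length : Int)) from by simp [pysem]]
        exact aCheck_eq_zip_all b.toList u.toList hL'.symm
      rw [if_pos hL, hA]
      by_cases hZ : (b.toList.zip u.toList).all (fun p => p.1 == '*' || p.1 == p.2) = true
      · have hcond : (PySem.Str.len u == PySem.Str.len b &&
            (b.toList.zip u.toList).all (fun p => p.1 == '*' || p.1 == p.2)) = true := by
          rw [beq_iff_eq.mpr hL, hZ]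
          rfl
        have haltm : altMatch (us ++ [u]) b = altMatch us b ++ [(us.length : Int)] := by
          simp only [altMatch, PySem.List.enumerate_append, List.filterMap_append,
            PySem.List.enumerate_cons, PySem.List.enumerate_nil, List.filterMap_cons,
            List.filterMap_nil, hcond]
          simp
        rw [if_pos hZ, haltm]
        rw [List.set_set]
        congr 1
        have hk2 : k < (m.set k (m.getD k [] ++ altMatch us b)).length := by simpa using hk
        rw [List.getD_eq_getElem _ _ hk2, List.getElem_set_self, List.append_assoc]
      · have hcond : (PySem.Str.len u == PySem.Str.len b &&
            (b.toList.zip u.toList).all (fun p => p.1 == '*' || p.1 == p.2)) = false := by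
          simp only [Bool.and_eq_false_iff]
          right
          simpa using hZ
        have haltm : altMatch (us ++ [u]) b = altMatch us b := by
          simp only [altMatch, PySem.List.enumerate_append, List.filterMap_append,
            PySem.List.enumerate_cons, PySem.List.enumerate_nil, List.filterMap_cons,
            List.filterMap_nil, hcond]
          simp
        rw [if_neg (by simpa using hZ), haltm]
    · have hcond : (PySem.Str.len u == PySem.Str.len b &&
          (b.toList.zip u.toList).all (fun p => p.1 == '*' || p.1 == p.2)) = false := by
        simp only [Bool.and_eq_false_iff]
        left
        simpa using hL
      have haltm : altMatch (us ++ [u]) b = altMatch us b := by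
        simp only [altMatch, PySem.List.enumerate_append, List.filterMap_append,
          PySem.List.enumerate_cons, PySem.List.enumerate_nil, List.filterMap_cons,
          List.filterMap_nil, hcond]
        simp
      rw [if_neg hL, haltm]

-- A's outer banned loop fills the rows left to right
theorem outerLoop (user_id : List String) :
    ∀ (bs : List String) (tail : List (List Int)),
    ((PySem.List.pyRange 0 ((bs.length : Int)) 1).foldl (fun m i =>
      let now_banned_id := PySem.List.pyGetD bs i ""
      (PySem.List.pyRange 0 ((user_id.length : Int)) 1).foldl (fun m j =>
        let now_id := PySem.List.pyGetD user_id j ""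
        if PySem.Str.len now_id = PySem.Str.len now_banned_id then
          if aCheck now_banned_id.toList now_id.toList
              (PySem.List.pyRange 0 (PySem.Str.len now_id) 1) then
            m.set i.toNat (m.getD i.toNat [] ++ [j])
          else m
        else m) m) (List.replicate bs.length [] ++ tail))
    = bs.map (fun b => altMatch user_id b) ++ tail := by
  intro bs
  induction bs using List.reverseRecOn with
  | nil =>
    intro tail
    rw [show PySem.List.pyRange 0 ((([] : List String).length : Int)) 1 = []
      from PySem.List.pyRange_one_eq_nil (by simp)]
    simp
  | append_singleton cs c ih =>
    intro tail
    have hlen : ((cs ++ [c]).length : Int) = (cs.length : Int) + 1 := by simp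
    rw [hlen, PySem.List.pyRange_one_succ_right (by positivity), List.foldl_append]
    have hseed : List.replicate (cs ++ [c]).length ([] : List Int) ++ tail
        = List.replicate cs.length ([] : List Int) ++ (([] : List Int) :: tail) := by
      simp [List.replicate_succ']
    rw [hseed]
    have hcongr : ∀ (m0 : List (List Int)),
        (PySem.List.pyRange 0 ((cs.length : Int)) 1).foldl (fun m i =>
          let now_banned_id := PySem.List.pyGetD (cs ++ [c]) i ""
          (PySem.List.pyRange 0 ((user_id.length : Int)) 1).foldl (fun m j =>
            let now_id := PySem.List.pyGetD user_id j ""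
            if PySem.Str.len now_id = PySem.Str.len now_banned_id then
              if aCheck now_banned_id.toList now_id.toList
                  (PySem.List.pyRange 0 (PySem.Str.len now_id) 1) then
                m.set i.toNat (m.getD i.toNat [] ++ [j])
              else m
            else m) m) m0
      = (PySem.List.pyRange 0 ((cs.length : Int)) 1).foldl (fun m i =>
          let now_banned_id := PySem.List.pyGetD cs i ""
          (PySem.List.pyRange 0 ((user_id.length : Int)) 1).foldl (fun m j =>
            let now_id := PySem.List.pyGetD user_id j ""
            if PySem.Str.len now_id = PySem.Str.len now_banned_id then
              if aCheck now_banned_id.toList now_id.toList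
                  (PySem.List.pyRange 0 (PySem.Str.len now_id) 1) then
                m.set i.toNat (m.getD i.toNat [] ++ [j])
              else m
            else m) m) m0 := by
      intro m0
      apply PySem.List.foldl_congr_mem
      intro acc i hi
      obtain ⟨hi0, hi1⟩ := PySem.List.mem_pyRange_one.mp hi
      have hget : PySem.List.pyGetD (cs ++ [c]) i "" = PySem.List.pyGetD cs i "" := by
        rw [PySem.List.pyGetD_eq_getElem _ _ hi0 (by simp; omega),
          PySem.List.pyGetD_eq_getElem _ _ hi0 (by omega)]
        exact List.getElem_append_left (by omega)
      simp only [hget]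
    rw [hcongr, ih (([] : List Int) :: tail)]
    have hgetc : PySem.List.pyGetD (cs ++ [c]) ((cs.length : Int)) "" = c := by
      rw [PySem.List.pyGetD_eq_getElem _ _ (by positivity) (by simp)]
      simp
    simp only [List.foldl_cons, List.foldl_nil, hgetc]
    have hk : cs.length < (cs.map (fun b => altMatch user_id b) ++ ([] : List Int) :: tail).length := by
      simp
    have htoNat : ((cs.length : Int)).toNat = cs.length := by simp
    rw [htoNat, innerLoop c user_id _ cs.length hk]
    have hgd : (cs.map (fun b => altMatch user_id b) ++ ([] : List Int) :: tail).getD cs.length []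
        = ([] : List Int) := by
      have := getD_append_cons (cs.map (fun b => altMatch user_id b)) ([] : List Int) tail ([] : List Int)
      simpa using this
    rw [hgd]
    have hset := set_append_cons (cs.map (fun b => altMatch user_id b)) ([] : List Int) tail
      (altMatch user_id c)
    simp only [List.length_map] at hset
    rw [List.nil_append, hset]
    simp

-- A's match-building double loop produces exactly banned_id.map (altMatch user_id)
theorem matchEq (user_id banned_id : List String) :
    ((PySem.List.pyRange 0 ((banned_id.length : Int)) 1).foldl (fun m i =>
      (PySem.List.pyRange 0 ((user_id.length : Int)) 1).foldl (fun m j =>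
        if PySem.Str.len (PySem.List.pyGetD user_id j "")
            = PySem.Str.len (PySem.List.pyGetD banned_id i "") then
          if aCheck (PySem.List.pyGetD banned_id i "").toList
              (PySem.List.pyGetD user_id j "").toList
              (PySem.List.pyRange 0 (PySem.Str.len (PySem.List.pyGetD user_id j "")) 1) then
            m.set i.toNat (m.getD i.toNat [] ++ [j])
          else m
        else m) m) ((List.range banned_id.length).map (fun _ => ([] : List Int))))
    = banned_id.map (fun b => altMatch user_id b) := by
  have h0 : (List.range banned_id.length).map (fun _ => ([] : List Int))
      = List.replicate banned_id.length ([] : List Int) ++ [] := by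
    simp [List.map_const']
  rw [h0]
  simpa using outerLoop user_id banned_id []

theorem length_eq_card {l : List (PySem.Set Int)} (h : (l.map canonIdx).Nodup) :
    l.length = (l.map canonIdx).toFinset.card := by
  rw [List.toFinset_card_of_nodup h, List.length_map]

theorem solution_eq_alt (user_id banned_id : List String) :
    solution user_id banned_id = solution_alt user_id banned_id := by
  simp only [solution, solution_alt]
  rw [matchEq user_id banned_id]
  have hbl : (banned_id.length : Int)
      = ((banned_id.map (fun b => altMatch user_id b)).length : Int) := by simp
  rw [hbl]
  have h1 := aBfs_spec (banned_id.map (fun b => altMatch user_id b))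
    [PySem.Set.empty] []
    (by
      intro s hs
      simp only [List.mem_singleton] at hs
      subst hs
      exact ⟨List.nodup_nil, by simp [PySem.Set.empty]⟩)
    (by simp) (by simp)
  have h2 := altRec_spec (banned_id.map (fun b => altMatch user_id b))
    PySem.Set.empty [] List.nodup_nil (by simp) (by simp)
  have hflat : ([PySem.Set.empty].flatMap
      (fun s => leavesT ((banned_id.map (fun b => altMatch user_id b)).drop s.length) s))
      = leavesT (banned_id.map (fun b => altMatch user_id b)) PySem.Set.empty := by
    simp [PySem.Set.empty]
  have hcard : (aBfs (banned_id.map (fun b => altMatch user_id b))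
        ((banned_id.map (fun b => altMatch user_id b)).length : Int)
        [PySem.Set.empty] []).length
      = (altRec (banned_id.map (fun b => altMatch user_id b)) PySem.Set.empty []).length := by
    rw [length_eq_card h1.2.1, length_eq_card h2.2.1, h1.2.2, h2.2.2, hflat]
  exact_mod_cast hcard

-- ===== VERDICT (by name: the statement is the Claim_ definition above) =====
theorem solution_spec : Claim_equal_solution := by
  intro user_id banned_id _
  unfold Spec_solution
  exact solution_eq_alt user_id banned_id
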